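-- pv_equiv track=rewrite | github.com/LilMako17/AoC2023 | Day2.py | getminset
-- ===== SOURCE A (Python) =====
-- def getminset(gameresult):
--     min = [0, 0, 0]
--     for set in gameresult:
--         if set[0] > min[0]:
--             min[0] = set[0]
--         if set[1] > min[1]:
--             min[1] = set[1]
--         if set[2] > min[2]:
--             min[2] = set[2]
--     return min
-- ===== SOURCE B (Python) =====
-- def getminset(gameresult):
--     # Divide at the head: combine the first row with the result for the rest,
--     # recursing to the end of the list (so the maxima are built back-to-front).
--     if not gameresult:
--         return [0, 0, 0]
--     r, g, b = gameresult[0]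
--     rest = getminset(gameresult[1:])
--     return [max(r, rest[0]), max(g, rest[1]), max(b, rest[2])]
-- ===== Notes on version B (the rewrite author's own statement) =====
-- stated objective: alternative
-- what changed: Replaces A's iterative forward pass mutating three running maxima with a structural recursion that computes the result for the tail first and then combines the head row into it with max, building the maxima back-to-front.
import Mathlib
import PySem

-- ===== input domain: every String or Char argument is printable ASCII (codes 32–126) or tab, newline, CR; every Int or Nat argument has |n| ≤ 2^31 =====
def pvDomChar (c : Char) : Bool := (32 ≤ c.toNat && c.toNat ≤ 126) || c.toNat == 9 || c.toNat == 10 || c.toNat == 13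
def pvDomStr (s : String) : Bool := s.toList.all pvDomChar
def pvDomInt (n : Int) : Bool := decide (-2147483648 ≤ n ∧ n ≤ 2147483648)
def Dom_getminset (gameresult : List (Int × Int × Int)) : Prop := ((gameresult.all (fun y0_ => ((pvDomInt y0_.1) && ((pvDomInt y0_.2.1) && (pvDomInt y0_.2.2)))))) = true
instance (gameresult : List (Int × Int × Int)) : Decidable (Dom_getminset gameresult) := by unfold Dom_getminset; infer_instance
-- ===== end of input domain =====

-- B replaces A's iterative forward pass over three running maxima with a structural recursion that solves the tail first and combines the head row in with max (same behaviour, a different decomposition).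

-- ===== PORT A =====
-- one forward pass over the rows, updating the triple of running maxima exactly as A's three ifs do
def getminset (gameresult : List (Int × Int × Int)) : List Int :=
  let m := gameresult.foldl
    (fun (m : Int × Int × Int) s =>
      let m0 := if s.1 > m.1 then s.1 else m.1
      let m1 := if s.2.1 > m.2.1 then s.2.1 else m.2.1
      let m2 := if s.2.2 > m.2.2 then s.2.2 else m.2.2
      (m0, m1, m2))
    (0, 0, 0)
  [m.1, m.2.1, m.2.2]

-- ===== PORT B =====
-- Source B's recursion: empty list -> [0,0,0]; otherwise recurse on the tail and combine the
-- head with max. rest always has length 3, so Python's rest[i] never raises and plain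
-- getD i 0 is an exact port of the indexing.
def getminset_alt : List (Int × Int × Int) → List Int
  | [] => [0, 0, 0]
  | (r, g, b) :: t =>
    let rest := getminset_alt t
    [max r (rest.getD 0 0), max g (rest.getD 1 0), max b (rest.getD 2 0)]

-- ===== PRECONDITION & SPEC =====
def Spec_getminset (gameresult : List (Int × Int × Int)) (out : List Int) : Prop := out = getminset_alt gameresult
instance (gameresult : List (Int × Int × Int)) (out : List Int) : Decidable (Spec_getminset gameresult out) := by unfold Spec_getminset; infer_instance

-- ===== CLAIM (what is proved, stated in full; the proofs are below) =====
def Claim_equal_getminset : Prop := ∀ (gameresult : List (Int × Int × Int)), Dom_getminset gameresult → Spec_getminset gameresult (getminset gameresult)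

-- ===== LEMMAS AND PROOFS =====

-- A's triple fold splits into three column-wise left folds of max, for any start triple
theorem getminset_fold_split (g : List (Int × Int × Int)) :
    ∀ (a b c : Int),
      g.foldl
        (fun (m : Int × Int × Int) s =>
          let m0 := if s.1 > m.1 then s.1 else m.1
          let m1 := if s.2.1 > m.2.1 then s.2.1 else m.2.1
          let m2 := if s.2.2 > m.2.2 then s.2.2 else m.2.2
          (m0, m1, m2))
        (a, b, c)
      = ((g.map (fun s => s.1)).foldl max a,
         (g.map (fun s => s.2.1)).foldl max b,
         (g.map (fun s => s.2.2)).foldl max c) := by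
  induction g with
  | nil => intro a b c; rfl
  | cons hd tl ih =>
    intro a b c
    simp only [List.foldl_cons, List.map_cons]
    rw [ih]
    congr 1 <;> [skip; congr 1] <;> · congr 1; simp [max_def]; split_ifs <;> omega

-- B's recursion computes the three column-wise RIGHT folds of max (seed 0)
theorem getminset_alt_foldr (g : List (Int × Int × Int)) :
    getminset_alt g
      = [(g.map (fun s => s.1)).foldr max 0,
         (g.map (fun s => s.2.1)).foldr max 0,
         (g.map (fun s => s.2.2)).foldr max 0] := by
  induction g with
  | nil => rfl
  | cons hd tl ih =>
    obtain ⟨r, gg, b⟩ := hd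
    simp [getminset_alt, ih, List.getD]

-- ===== VERDICT (by name: the statement is the Claim_ definition above) =====
theorem getminset_spec : Claim_equal_getminset := by
  intro g _
  show getminset g = getminset_alt g
  simp only [getminset, getminset_fold_split, getminset_alt_foldr,
    List.foldl_eq_foldr]
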